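-- pv_equiv track=rewrite | github.com/xadupre/xadupre.github.io | draft/mlprodict/_downloads/d28e019dea7a5c96529a07e61524267b/onnx_operator_cost.py | _is_rotation
-- ===== SOURCE A (Python) =====
-- def _is_rotation(perm):
--     t = tuple(perm)
--     c = list(range(len(perm)))
--     for i in range(len(c)):
--         for k in range(len(c)):
--             c[k] = (k + i) % len(c)
--         if t == tuple(c):
--             return True
--     return False
-- ===== SOURCE B (Python) =====
-- def _is_rotation(perm):
--     n = len(perm)
--     if n == 0:
--         return False
--     off = perm[0]
--     return all(v == (k + off) % n for k, v in enumerate(perm))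
-- ===== Notes on version B (the rewrite author's own statement) =====
-- stated objective: faster
-- what changed: Instead of generating every one of the n candidate rotations and comparing each whole list (quadratic), B reads the offset from the first element and verifies each entry equals (index + offset) mod n in one pass.
import Mathlib
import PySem

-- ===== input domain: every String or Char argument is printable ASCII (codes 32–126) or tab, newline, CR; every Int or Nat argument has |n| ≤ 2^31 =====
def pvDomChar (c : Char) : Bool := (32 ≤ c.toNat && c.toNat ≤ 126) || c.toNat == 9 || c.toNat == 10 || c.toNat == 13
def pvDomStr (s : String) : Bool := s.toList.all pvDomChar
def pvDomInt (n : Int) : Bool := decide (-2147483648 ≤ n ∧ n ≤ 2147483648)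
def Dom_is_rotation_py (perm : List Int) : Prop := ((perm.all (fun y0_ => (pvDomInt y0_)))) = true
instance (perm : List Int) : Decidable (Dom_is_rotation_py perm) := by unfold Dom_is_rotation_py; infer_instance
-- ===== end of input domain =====

-- B reads the offset from the first element and checks each entry equals (index + offset) mod n in a single pass instead of A's quadratic
-- generate-and-compare over all n rotations.

-- ===== PORT A =====
-- the outer 'for i' loop; each iteration overwrites c with [(k+i)%n for k in range(n)]
def is_rotation_py_loop (t : List Int) (n : Int) : List Int → List Int → Bool
  | _c, [] => false
  | _c, i :: rest =>
    let c' := (PySem.List.pyRange 0 n 1).map (fun k => PySem.Int.mod (k + i) n)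
    if t = c' then true else is_rotation_py_loop t n c' rest

def is_rotation_py (perm : List Int) : Bool :=
  let t := perm
  let c := PySem.List.pyRange 0 (perm.length : Int) 1
  is_rotation_py_loop t (perm.length : Int) c (PySem.List.pyRange 0 (perm.length : Int) 1)

-- ===== PORT B =====
def is_rotation_py_alt (perm : List Int) : Bool :=
  match perm with
  | [] => false
  | off :: _ =>
    (PySem.List.enumerate perm 0).all
      (fun kv => kv.2 == PySem.Int.mod (kv.1 + off) (perm.length : Int))

-- ===== PRECONDITION & SPEC =====
def Spec_is_rotation_py (perm : List Int) (out : Bool) : Prop := out = is_rotation_py_alt perm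
instance (perm : List Int) (out : Bool) : Decidable (Spec_is_rotation_py perm out) := by unfold Spec_is_rotation_py; infer_instance

-- ===== CLAIM (what is proved, stated in full; the proofs are below) =====
def Claim_equal_is_rotation_py : Prop := ∀ (perm : List Int), Dom_is_rotation_py perm → Spec_is_rotation_py perm (is_rotation_py perm)

-- ===== LEMMAS AND PROOFS =====

-- A's loop ignores the threaded c: it is any i with t = rotation-by-i
theorem loop_eq_any (t : List Int) (n : Int) (c is : List Int) :
    is_rotation_py_loop t n c is
      = is.any (fun i => t = (PySem.List.pyRange 0 n 1).map (fun k => PySem.Int.mod (k + i) n)) := by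
  induction is generalizing c with
  | nil => rfl
  | cons i rest ih =>
    simp only [is_rotation_py_loop, List.any_cons]
    split_ifs with h
    · simp [h]
    · simp [h, ih]

-- pointwise characterisation of "perm equals the rotation by off"
theorem rot_iff (perm : List Int) (off : Int) :
    (perm = (PySem.List.pyRange 0 (perm.length : Int) 1).map
        (fun k => PySem.Int.mod (k + off) (perm.length : Int)))
      ↔ ∀ (k : Nat) (h : k < perm.length),
          perm[k] = PySem.Int.mod ((k : Int) + off) (perm.length : Int) := by
  constructor
  · intro he k h
    rw [List.getElem_of_eq he, List.getElem_map, PySem.List.getElem_pyRange_one]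
    · simp
  · intro hp
    apply List.ext_getElem
    · simp [PySem.List.length_pyRange_one]
    · intro k h1 h2
      rw [List.getElem_map, PySem.List.getElem_pyRange_one]
      simpa using hp k h1

-- B's all-check is the same pointwise condition (for nonempty perm with head off)
theorem alt_iff (perm : List Int) (off : Int) (rest : List Int) (hperm : perm = off :: rest) :
    (is_rotation_py_alt perm = true)
      ↔ ∀ (k : Nat) (h : k < perm.length),
          perm[k] = PySem.Int.mod ((k : Int) + off) (perm.length : Int) := by
  subst hperm
  rw [is_rotation_py_alt, List.all_eq_true]
  constructor
  · intro hall k h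
    have := hall ((k : Int), (off :: rest)[k]) (by
      rw [PySem.List.mem_enumerate_iff]; exact ⟨k, h, by simp⟩)
    simpa using this
  · intro hp kv hkv
    rw [PySem.List.mem_enumerate_iff] at hkv
    obtain ⟨k, h, rfl⟩ := hkv
    simpa using hp k h

theorem mod_self_of_range (i n : Int) (h0 : 0 ≤ i) (h1 : i < n) : PySem.Int.mod i n = i := by
  rw [PySem.Int.mod_eq_emod_of_pos (show (0:Int) < n by omega)]
  exact Int.emod_eq_of_lt h0 h1

-- the existential over rotation indices collapses to the single candidate off = perm[0]
theorem main_iff (off : Int) (rest : List Int) (perm : List Int) (hperm : perm = off :: rest) :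
    (∃ i ∈ PySem.List.pyRange 0 (perm.length : Int) 1,
        perm = (PySem.List.pyRange 0 (perm.length : Int) 1).map
          (fun k => PySem.Int.mod (k + i) (perm.length : Int)))
      ↔ ∀ (k : Nat) (h : k < perm.length),
          perm[k] = PySem.Int.mod ((k : Int) + off) (perm.length : Int) := by
  have hn : (0 : Int) < (perm.length : Int) := by subst hperm; simp
  have h0len : 0 < perm.length := by subst hperm; simp
  have hhead : perm[0]'h0len = off := by subst hperm; simp
  constructor
  · intro ⟨i, hi, he⟩
    rw [PySem.List.mem_pyRange_one] at hi
    have hp := (rot_iff perm i).mp he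
    have : off = i := by
      have := hp 0 h0len
      rw [hhead] at this
      simpa [mod_self_of_range i _ hi.1 hi.2] using this
    subst this
    exact hp
  · intro hp
    have h0 := hp 0 h0len
    rw [hhead] at h0
    have hoff0 : off = PySem.Int.mod off (perm.length : Int) := by simpa using h0
    have hlo : 0 ≤ off := by
      rw [hoff0, PySem.Int.mod_eq_emod_of_pos hn]
      exact Int.emod_nonneg _ (by omega)
    have hhi : off < (perm.length : Int) := by
      rw [hoff0, PySem.Int.mod_eq_emod_of_pos hn]
      exact Int.emod_lt_of_pos _ hn
    exact ⟨off, by rw [PySem.List.mem_pyRange_one]; exact ⟨hlo, hhi⟩,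
      (rot_iff perm off).mpr hp⟩

-- ===== VERDICT (by name: the statement is the Claim_ definition above) =====
theorem is_rotation_py_spec : Claim_equal_is_rotation_py := by
  intro perm _
  unfold Spec_is_rotation_py
  cases hperm : perm with
  | nil => decide
  | cons off rest =>
    rw [Bool.eq_iff_iff, is_rotation_py, loop_eq_any, alt_iff (off :: rest) off rest rfl]
    simp only [List.any_eq_true, decide_eq_true_eq]
    exact main_iff off rest (off :: rest) rfl
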